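-- pv_equiv track=rewrite | github.com/hprovyn/clade-finder | Common/CommonMethods.py | isUpstream
-- ===== SOURCE A (Python) =====
-- def getTotalSequence(clade, hierarchy):
--     sequence = [clade]
--     thisClade = clade
--     while thisClade in hierarchy:
--         thisClade = hierarchy[thisClade]
--         sequence.append(thisClade)
--     return sequence[:-1]
--
-- def isUpstream(predictedClade, panelRoot, hierarchyForClade):
--     sequence = getTotalSequence(predictedClade, hierarchyForClade)
--     passed = False
--     for clade in sequence:
--         if not passed:
--             if clade == panelRoot:
--                 passed = True
--     return passed
-- ===== SOURCE B (Python) =====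
-- def isUpstream(predictedClade, panelRoot, hierarchyForClade):
--     thisClade = predictedClade
--     while thisClade in hierarchyForClade:
--         if thisClade == panelRoot:
--             return True
--         thisClade = hierarchyForClade[thisClade]
--     return False
-- ===== Notes on version B (the rewrite author's own statement) =====
-- stated objective: simpler
-- what changed: Fuses getTotalSequence and the flag-scan into a single early-exiting walk up the hierarchy, never materializing the ancestor list or maintaining the 'passed' flag.
import Mathlib
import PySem

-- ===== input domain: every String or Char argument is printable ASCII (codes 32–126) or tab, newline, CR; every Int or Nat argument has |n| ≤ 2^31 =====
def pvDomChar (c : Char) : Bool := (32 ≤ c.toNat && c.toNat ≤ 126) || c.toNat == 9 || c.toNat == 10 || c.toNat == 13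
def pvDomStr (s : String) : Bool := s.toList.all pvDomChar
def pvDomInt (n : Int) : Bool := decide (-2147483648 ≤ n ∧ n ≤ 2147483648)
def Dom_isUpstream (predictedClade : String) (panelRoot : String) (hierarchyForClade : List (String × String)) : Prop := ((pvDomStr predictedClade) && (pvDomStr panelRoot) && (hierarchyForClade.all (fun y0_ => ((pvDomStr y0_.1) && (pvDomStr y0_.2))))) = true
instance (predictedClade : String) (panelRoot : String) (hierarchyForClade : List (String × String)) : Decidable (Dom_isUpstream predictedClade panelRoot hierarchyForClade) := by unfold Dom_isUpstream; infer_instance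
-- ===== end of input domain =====

-- ===== PORT A =====
-- header: B fuses A's two passes (build ancestor list, then flag-scan) into one early-exiting
-- walk up the hierarchy — simpler, no intermediate list.  (Ports use fuel hierarchy.length+1,
-- enough whenever the Python A terminates; on cyclic hierarchies the Python A diverges.)

-- first-match lookup in the association list (the dict under the type convention)
def pvLookup (h : List (String × String)) (k : String) : Option String :=
  (h.find? (fun p => p.1 == k)).map (·.2)

-- the while-loop of getTotalSequence, fueled; appends hierarchy[thisClade] each iteration
def pvSeqLoop (h : List (String × String)) : Nat → String → List String → List String
  | 0, _, seq => seq
  | Nat.succ fuel, thisClade, seq =>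
    match pvLookup h thisClade with
    | some next => pvSeqLoop h fuel next (seq ++ [next])
    | none => seq

def getTotalSequence (clade : String) (h : List (String × String)) : List String :=
  (pvSeqLoop h (h.length + 1) clade [clade]).dropLast   -- sequence[:-1]

def isUpstream (predictedClade : String) (panelRoot : String) (hierarchyForClade : List (String × String)) : Bool :=
  let sequence := getTotalSequence predictedClade hierarchyForClade
  sequence.foldl (fun passed clade => if !passed then (if clade == panelRoot then true else passed) else passed) false

-- ===== PORT B =====
-- one early-exiting walk: return True at panelRoot, advance while the clade is a key
def pvWalk (h : List (String × String)) (root : String) : Nat → String → Bool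
  | 0, _ => false
  | Nat.succ fuel, c =>
    match pvLookup h c with
    | some next => if c == root then true else pvWalk h root fuel next
    | none => false

def isUpstream_alt (predictedClade : String) (panelRoot : String) (hierarchyForClade : List (String × String)) : Bool :=
  pvWalk hierarchyForClade panelRoot (hierarchyForClade.length + 1) predictedClade

-- ===== PRECONDITION & SPEC =====
def Spec_isUpstream (predictedClade : String) (panelRoot : String) (hierarchyForClade : List (String × String)) (out : Bool) : Prop := out = isUpstream_alt predictedClade panelRoot hierarchyForClade
instance (predictedClade : String) (panelRoot : String) (hierarchyForClade : List (String × String)) (out : Bool) : Decidable (Spec_isUpstream predictedClade panelRoot hierarchyForClade out) := by unfold Spec_isUpstream; infer_instance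

-- ===== CLAIM (what is proved, stated in full; the proofs are below) =====
def Claim_equal_isUpstream : Prop := ∀ (predictedClade : String) (panelRoot : String) (hierarchyForClade : List (String × String)), Dom_isUpstream predictedClade panelRoot hierarchyForClade → Spec_isUpstream predictedClade panelRoot hierarchyForClade (isUpstream predictedClade panelRoot hierarchyForClade)

-- ===== LEMMAS AND PROOFS =====

-- the sequence loop without its accumulator
def pvTail (h : List (String × String)) : Nat → String → List String
  | 0, _ => []
  | Nat.succ fuel, c =>
    match pvLookup h c with
    | some next => next :: pvTail h fuel next
    | none => []

theorem pvSeqLoop_eq_append (h : List (String × String)) :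
    ∀ (fuel : Nat) (c : String) (seq : List String),
      pvSeqLoop h fuel c seq = seq ++ pvTail h fuel c := by
  intro fuel
  induction fuel with
  | zero => intro c seq; simp [pvSeqLoop, pvTail]
  | succ n ih =>
    intro c seq
    simp only [pvSeqLoop, pvTail]
    cases pvLookup h c with
    | none => simp
    | some next => simp [ih]

-- A's flag fold is membership test
theorem pvFold_eq_any (root : String) :
    ∀ (l : List String) (passed : Bool),
      l.foldl (fun passed clade => if !passed then (if clade == root then true else passed) else passed) passed
        = (passed || l.any (· == root)) := by
  intro l
  induction l with
  | nil => simp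
  | cons x xs ih =>
    intro passed
    rw [List.foldl_cons, ih, List.any_cons]
    cases passed <;> cases hx : x == root <;> simp [hx]

-- the core: A's scan of the truncated chain equals B's early-exiting walk, any fuel
theorem pvAny_dropLast_eq_walk (h : List (String × String)) (root : String) :
    ∀ (fuel : Nat) (c : String),
      ((c :: pvTail h fuel c).dropLast.any (· == root)) = pvWalk h root fuel c := by
  intro fuel
  induction fuel with
  | zero => intro c; simp [pvTail, pvWalk]
  | succ n ih =>
    intro c
    simp only [pvTail, pvWalk]
    cases hc : pvLookup h c with
    | none => simp
    | some next =>
      have : (c :: next :: pvTail h n next).dropLast = c :: (next :: pvTail h n next).dropLast := by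
        simp [List.dropLast]
      rw [this]
      cases hcr : c == root with
      | true => simp [hcr]
      | false => simp only [List.any_cons, hcr, Bool.false_or]; exact ih next

-- ===== VERDICT (by name: the statement is the Claim_ definition above) =====
theorem isUpstream_spec : Claim_equal_isUpstream := by
  intro p root h _
  unfold Spec_isUpstream isUpstream isUpstream_alt getTotalSequence
  rw [pvSeqLoop_eq_append, pvFold_eq_any]
  simpa using pvAny_dropLast_eq_walk h root (h.length + 1) p
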